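-- pv_equiv track=rewrite | github.com/alis-khadka/llm_program_grader | dataset/solutions/21_22-1-1-python/QOCBRB6C.py | calc
-- ===== SOURCE A (Python) =====
-- def calc(n):
--
--     if n == 0:
--         return 0
--
--     elif n%2 == 0:
--         a = calc(n//2) + 1
--
--         return ((a * a) - 1)%1000000007
--     elif n%2 == 1:
--         a = calc(n-1) + 1
--         return (2 * a - 1)%1000000007
--
--     pass
-- ===== SOURCE B (Python) =====
-- def calc(n):
--     m = 1000000007
--     return (pow(2, n, m) - 1) % m
-- ===== Notes on version B (the rewrite author's own statement) =====
-- stated objective: simpler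
-- what changed: Replaced the even/odd recursion over halving n by the closed form 2^n - 1 mod 1000000007, computed with one built-in modular exponentiation call.
import Mathlib
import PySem

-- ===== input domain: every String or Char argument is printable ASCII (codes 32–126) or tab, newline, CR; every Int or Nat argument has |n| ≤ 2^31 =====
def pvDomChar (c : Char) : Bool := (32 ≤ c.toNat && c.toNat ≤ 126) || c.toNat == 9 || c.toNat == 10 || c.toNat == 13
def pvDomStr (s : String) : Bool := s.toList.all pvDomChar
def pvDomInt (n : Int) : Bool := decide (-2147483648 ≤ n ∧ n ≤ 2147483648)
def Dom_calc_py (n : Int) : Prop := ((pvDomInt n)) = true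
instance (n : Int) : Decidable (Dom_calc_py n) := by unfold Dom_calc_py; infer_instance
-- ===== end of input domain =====

-- B replaces A's even/odd recursion by the closed form (2^n - 1) mod 1000000007 (objective: simpler).

-- ===== PORT A =====
-- A recurses on n//2 (even) / n-1 (odd); the recursion terminates for n ≥ 0 with depth ≤ n,
-- so fuel n.toNat + 1 reproduces it exactly there (negative n, where Python overflows the
-- recursion stack, is excluded by Pre_calc_py; the fuel-out value 0 is never reached on Pre_).
def calcFuel : Nat → Int → Int
  | 0, _ => 0
  | fuel + 1, n =>
    if n = 0 then 0
    else if PySem.Int.mod n 2 = 0 then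
      let a := calcFuel fuel (PySem.Int.floordiv n 2) + 1
      PySem.Int.mod (a * a - 1) 1000000007
    else if PySem.Int.mod n 2 = 1 then
      let a := calcFuel fuel (n - 1) + 1
      PySem.Int.mod (2 * a - 1) 1000000007
    else 0  -- unreachable: n % 2 is always 0 or 1 in Python

def calc_py (n : Int) : Int := calcFuel (n.toNat + 1) n

-- ===== PORT B =====
def calc_py_alt (n : Int) : Int :=
  let m : Int := 1000000007
  PySem.Int.mod (PySem.Int.powMod 2 n.toNat m - 1) m

-- ===== PRECONDITION & SPEC =====
-- Pre_ excludes n < 0, where A recurses forever (Python RecursionError).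
def Pre_calc_py (n : Int) : Prop := 0 ≤ n
instance (n : Int) : Decidable (Pre_calc_py n) := by unfold Pre_calc_py; infer_instance
def pvWitness_calc_py : Int := (6)

def Spec_calc_py (n : Int) (out : Int) : Prop := out = calc_py_alt n
instance (n : Int) (out : Int) : Decidable (Spec_calc_py n out) := by unfold Spec_calc_py; infer_instance

-- ===== CLAIM (what is proved, stated in full; the proofs are below) =====
def Claim_equal_calc_py : Prop := ∀ (n : Int), Dom_calc_py n → Pre_calc_py n → Spec_calc_py n (calc_py n)

-- ===== LEMMAS AND PROOFS =====

-- A's result is the closed form (2^n - 1) % 1000000007, for any sufficient fuel.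
theorem calcFuel_eq (fuel : Nat) : ∀ n : Int, 0 ≤ n → n.toNat < fuel →
    calcFuel fuel n = (2 ^ n.toNat - 1) % 1000000007 := by
  induction fuel with
  | zero => intro n _ h; omega
  | succ fuel ih =>
    intro n hn hfuel
    by_cases h0 : n = 0
    · subst h0; simp [calcFuel]
    · have hmp : ∀ x : Int, PySem.Int.mod x 1000000007 = x % 1000000007 :=
        fun x => PySem.Int.mod_eq_emod_of_pos (by norm_num)
      have hmod : PySem.Int.mod n 2 = n % 2 := PySem.Int.mod_eq_emod_of_pos (by omega)
      have hdiv : PySem.Int.floordiv n 2 = n / 2 := PySem.Int.floordiv_eq_ediv_of_pos (by omega)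
      by_cases he : n % 2 = 0
      · -- even case
        have h2 : (2 : Int) ≤ n := by omega
        have hlt : (n / 2).toNat < fuel := by omega
        have ihv := ih (n / 2) (by omega) hlt
        simp only [calcFuel, h0, hmod, hdiv, he, reduceIte]
        rw [hmp]
        rw [ihv]
        set p : Int := 1000000007 with hp
        set k : Nat := (n / 2).toNat with hk
        have hnk : n.toNat = k + k := by omega
        have h1 : ((2 ^ k - 1) % p + 1) % p = 2 ^ k % p := by
          have := Int.emod_emod_of_dvd (2 ^ k - 1) (dvd_refl p)
          have h2' : Int.ModEq p ((2 ^ k - 1) % p) (2 ^ k - 1) := this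
          have := (h2'.add_right 1)
          simp at this
          exact this
        have hmeq : Int.ModEq p ((2 ^ k - 1) % p + 1) (2 ^ k) := h1
        have hfin : Int.ModEq p (((2 ^ k - 1) % p + 1) * ((2 ^ k - 1) % p + 1) - 1)
            (2 ^ k * 2 ^ k - 1) := (hmeq.mul hmeq).sub_right 1
        rw [hnk, pow_add]
        exact hfin
      · -- odd case
        have ho : n % 2 = 1 := by omega
        have hlt : (n - 1).toNat < fuel := by omega
        have ihv := ih (n - 1) (by omega) hlt
        have h10 : (((1:Int) = 0)) = False := by norm_num
        simp only [calcFuel, h0, hmod, ho, h10, reduceIte]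
        rw [hmp]
        rw [ihv]
        set p : Int := 1000000007 with hp
        set k : Nat := (n - 1).toNat with hk
        have hnk : n.toNat = k + 1 := by omega
        have h1 : Int.ModEq p ((2 ^ k - 1) % p + 1) (2 ^ k) := by
          have h2' : Int.ModEq p ((2 ^ k - 1) % p) (2 ^ k - 1) :=
            Int.emod_emod_of_dvd (2 ^ k - 1) (dvd_refl p)
          simpa using h2'.add_right 1
        have hfin : Int.ModEq p (2 * ((2 ^ k - 1) % p + 1) - 1) (2 * 2 ^ k - 1) :=
          ((Int.ModEq.refl 2).mul h1).sub_right 1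
        rw [hnk, pow_succ]
        calc (2 * ((2 ^ k - 1) % p + 1) - 1) % p
            = (2 * 2 ^ k - 1) % p := hfin
          _ = (2 ^ k * 2 - 1) % p := by ring_nf

-- ===== VERDICT (by name: the statement is the Claim_ definition above) =====
theorem calc_py_spec : Claim_equal_calc_py := by
  intro n _ hpre
  unfold Spec_calc_py calc_py
  show calcFuel (n.toNat + 1) n =
    PySem.Int.mod (PySem.Int.powMod 2 n.toNat 1000000007 - 1) 1000000007
  rw [calcFuel_eq (n.toNat + 1) n hpre (by omega),
      PySem.Int.powMod_eq_emod 2 n.toNat (by norm_num),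
      PySem.Int.mod_eq_emod_of_pos (by norm_num)]
  rw [Int.sub_emod]
  norm_num
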